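-- pv_equiv track=rewrite | github.com/phatakshaunak/scaler_academy | DSA_Problem_Solving/Prime_Numbers/count_divisors.py | solve
-- ===== SOURCE A (Python) =====
-- def solve(A):
--
--     # Generate an SPF array from 1 to max(A) and then prime factorize each element in the array
--
--     N = max(A)
--
--     spf = [0] * (N+1)
--
--     for i in range(2,N+1):
--
--         if spf[i] == 0:
--             spf[i] = i
--
--             for j in range(i*i,N+1,i):
--                 if spf[j] == 0:
--                     spf[j] = i
--
--     ans = []
--
--     for val in A:
--         count = 1
--         while val > 1:
--             prime = spf[val]
--             p = 1
--             while val % prime == 0: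
--                 p += 1
--                 val = val // prime
--
--             count = count * p
--
--         ans.append(count)
--
--     return ans
-- ===== SOURCE B (Python) =====
-- def solve(A):
--     # Divisor-count sieve: dcount[m] = number of d in [1,N] dividing m,
--     # which equals the divisor count of m for 1 <= m <= N.
--     N = max(A)
--     dcount = [0] * (N + 1)
--     for d in range(1, N + 1):
--         for m in range(d, N + 1, d):
--             dcount[m] += 1
--     return [dcount[v] if v > 1 else 1 for v in A]
-- ===== Notes on version B (the rewrite author's own statement) =====
-- stated objective: simpler
-- what changed: Replaces the SPF sieve plus per-element prime factorization (two nested while loops multiplying exponent+1 factors) with a direct divisor-count sieve: one pass over d = 1..max(A) adds 1 to every multiple of d, after which each answer is a single table lookup.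
-- outside the precondition, e.g. on solve([]): A raises ValueError, B raises ValueError
import Mathlib
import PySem

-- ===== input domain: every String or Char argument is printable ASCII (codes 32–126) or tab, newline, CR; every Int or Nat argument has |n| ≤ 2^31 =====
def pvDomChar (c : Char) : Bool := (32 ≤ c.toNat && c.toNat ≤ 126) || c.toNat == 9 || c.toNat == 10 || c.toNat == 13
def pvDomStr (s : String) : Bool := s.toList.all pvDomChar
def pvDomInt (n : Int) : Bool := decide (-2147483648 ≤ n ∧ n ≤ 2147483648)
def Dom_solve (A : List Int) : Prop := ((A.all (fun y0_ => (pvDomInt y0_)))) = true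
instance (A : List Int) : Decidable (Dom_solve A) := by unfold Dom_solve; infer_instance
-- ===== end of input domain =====

-- B replaces A's SPF sieve + per-element factorization with a divisor-count sieve (one lookup
-- per element); objective: simpler. Equivalence is about the return value.

-- ===== PORT A =====
-- inner `while val % prime == 0` loop; the fuel only bounds the iteration count
def solveInner : Nat → Int → Int → Int → Int × Int
  | 0, _prime, val, p => (p, val)
  | fuel+1, prime, val, p =>
      if PySem.Int.mod val prime = 0 then
        solveInner fuel prime (PySem.Int.floordiv val prime) (p + 1)
      else (p, val)

-- outer `while val > 1` loop
def solveOuter : Nat → List Int → Int → Int → Int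
  | 0, _spf, _val, count => count
  | fuel+1, spf, val, count =>
      if 1 < val then
        let prime := PySem.List.pyGetD spf val 0
        let r := solveInner val.toNat prime val 1
        solveOuter fuel spf r.2 (count * r.1)
      else count

-- body of the inner marking loop `for j in range(i*i, N+1, i)`
def sieveStepInner (i : Int) (s : List Int) (j : Int) : List Int :=
  if PySem.List.pyGetD s j 0 = 0 then PySem.List.pySetD s j i else s

-- body of `for i in range(2, N+1)`
def sieveStep (N : Int) (spf : List Int) (i : Int) : List Int :=
  if PySem.List.pyGetD spf i 0 = 0 then
    (PySem.List.pyRange (i*i) (N+1) i).foldl (sieveStepInner i) (PySem.List.pySetD spf i i)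
  else spf

def buildSpf (N : Int) : List Int :=
  (PySem.List.pyRange 2 (N+1) 1).foldl (sieveStep N) (List.replicate (N+1).toNat 0)

def solve (A : List Int) : List Int :=
  match PySem.List.max? A (fun x => x) with
  | none => []   -- Python: max([]) raises ValueError; excluded by Pre_solve
  | some N =>
      let spf := buildSpf N
      A.foldl (fun ans val => ans ++ [solveOuter val.toNat spf val 1]) []

-- ===== PORT B =====
-- body of `for m in range(d, N+1, d): dcount[m] += 1`
def dcStepInner (s : List Int) (m : Int) : List Int :=
  PySem.List.pySetD s m (PySem.List.pyGetD s m 0 + 1)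

-- body of `for d in range(1, N+1)`
def dcStep (N : Int) (s : List Int) (d : Int) : List Int :=
  (PySem.List.pyRange d (N+1) d).foldl dcStepInner s

def buildDc (N : Int) : List Int :=
  (PySem.List.pyRange 1 (N+1) 1).foldl (dcStep N) (List.replicate (N+1).toNat 0)

def solve_alt (A : List Int) : List Int :=
  match PySem.List.max? A (fun x => x) with
  | none => []   -- Python: max([]) raises ValueError; excluded by Pre_solve
  | some N =>
      let dc := buildDc N
      A.map (fun v => if 1 < v then PySem.List.pyGetD dc v 0 else 1)

-- ===== PRECONDITION & SPEC =====
-- Pre_ excludes only the empty list, on which Python's max([]) raises ValueError in both A and B.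
def Pre_solve (A : List Int) : Prop := A ≠ []
instance (A : List Int) : Decidable (Pre_solve A) := by unfold Pre_solve; infer_instance
def pvWitness_solve : List Int := [2, 5, 1]

def Spec_solve (A : List Int) (out : List Int) : Prop := out = solve_alt A
instance (A : List Int) (out : List Int) : Decidable (Spec_solve A out) := by unfold Spec_solve; infer_instance

-- ===== CLAIM (what is proved, stated in full; the proofs are below) =====
def Claim_equal_solve : Prop := ∀ (A : List Int), Dom_solve A → Pre_solve A → Spec_solve A (solve A)

-- ===== LEMMAS AND PROOFS =====

-- `minFac` of the Nat value of k, as an Int; the value A's sieve stores at index k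
def mfI (k : Int) : Int := (Nat.minFac k.toNat : Int)

-- value stored at index k by A's sieve when primes < i are fully processed and, for the prime i
-- itself, index i and the marked multiples below frontier f are processed
def spfVal (i f k : Int) : Int :=
  if mfI k < i ∨ (mfI k = i ∧ (k = i ∨ k < f)) then mfI k else 0

-- number of divisors of m that are ≤ D (what B's sieve has accumulated after pass D)
def cnt (D m : Nat) : Nat := ((Finset.Icc 1 D).filter (· ∣ m)).card

lemma mfI_two_le {k : Int} (hk : 2 ≤ k) : 2 ≤ mfI k := by
  have h1 : k.toNat ≠ 1 := by omega
  unfold mfI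
  exact_mod_cast (Nat.minFac_prime h1).two_le

lemma mfI_le {k : Int} (hk : 2 ≤ k) : mfI k ≤ k := by
  have h : Nat.minFac k.toNat ≤ k.toNat := Nat.minFac_le (by omega)
  unfold mfI; omega

lemma mfI_dvd {k : Int} (hk : 2 ≤ k) : mfI k ∣ k := by
  have h : (Nat.minFac k.toNat : Int) ∣ (k.toNat : Int) := Int.natCast_dvd_natCast.mpr (Nat.minFac_dvd _)
  rwa [Int.toNat_of_nonneg (by omega : (0:Int) ≤ k)] at h

lemma dvd_iff_toNat_dvd {x y : Int} (hx : 0 ≤ x) (hy : 0 ≤ y) : x ∣ y ↔ x.toNat ∣ y.toNat := by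
  rw [← Int.natCast_dvd_natCast, Int.toNat_of_nonneg hx, Int.toNat_of_nonneg hy]

lemma mfI_le_of_dvd {i k : Int} (hi : 2 ≤ i) (hk : 2 ≤ k) (h : i ∣ k) : mfI k ≤ i := by
  have := Nat.minFac_le_of_dvd (m := i.toNat) (n := k.toNat) (by omega)
    ((dvd_iff_toNat_dvd (by omega) (by omega)).mp h)
  unfold mfI; omega

lemma mfI_ne_of_not_prime {a k : Int} (hk2 : 2 ≤ k) (hnp : ¬ (a.toNat).Prime) : mfI k ≠ a := by
  intro he
  have hkp := Nat.minFac_prime (show k.toNat ≠ 1 by omega)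
  unfold mfI at he
  have h2 : k.toNat.minFac = a.toNat := by omega
  rw [h2] at hkp
  exact hnp hkp

lemma sq_le_of_mfI_eq {a k : Int} (ha : 2 ≤ a) (hk2 : 2 ≤ k) (hk : k ≠ a) (he : mfI k = a) :
    a * a ≤ k := by
  by_cases hp : (k.toNat).Prime
  · exfalso
    apply hk
    have h1 := hp.minFac_eq
    unfold mfI at he
    omega
  · have hsq := Nat.minFac_sq_le_self (by omega : 0 < k.toNat) hp
    unfold mfI at he
    have h2 : k.toNat.minFac = a.toNat := by omega
    rw [h2, pow_two] at hsq
    have h3 : ((a.toNat * a.toNat : Nat) : Int) ≤ ((k.toNat : Nat) : Int) := by exact_mod_cast hsq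
    push_cast at h3
    rw [Int.toNat_of_nonneg (by omega : (0:Int) ≤ a), Int.toNat_of_nonneg (by omega : (0:Int) ≤ k)] at h3
    exact h3

-- a positive-step pyRange peels its first element
lemma pyRange_cons_pos {a b s : Int} (hs : 0 < s) (hab : a < b) :
    PySem.List.pyRange a b s = a :: PySem.List.pyRange (a + s) b s := by
  rw [PySem.List.pyRange_of_pos _ _ hs, PySem.List.pyRange_of_pos _ _ hs, if_pos hab]
  by_cases h2 : a + s < b
  · rw [if_pos h2]
    have h := Int.add_mul_ediv_right (b - (a + s) + s - 1) 1 (ne_of_gt hs)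
    rw [one_mul] at h
    have hkey : (b - a + s - 1) / s = (b - (a + s) + s - 1) / s + 1 := by
      rw [← h]; congr 1; ring
    have hpos : 0 ≤ (b - (a + s) + s - 1) / s := Int.ediv_nonneg (by omega) (by omega)
    have hn : ((b - a + s - 1) / s).toNat = ((b - (a + s) + s - 1) / s).toNat + 1 := by omega
    rw [hn, List.range_succ_eq_map]
    simp only [List.map_cons, List.map_map]
    congr 1
    · norm_num
    · apply List.map_congr_left
      intro x _
      simp only [Function.comp_apply, Nat.succ_eq_add_one]
      push_cast
      ring
  · rw [if_neg h2]
    have h0 : 0 ≤ b - a - 1 := by omega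
    have h1 : b - a - 1 < s := by omega
    have h := Int.add_mul_ediv_right (b - a - 1) 1 (ne_of_gt hs)
    rw [one_mul] at h
    have hkey : (b - a + s - 1) / s = 1 := by
      have e1 : b - a + s - 1 = b - a - 1 + s := by ring
      rw [e1, h, Int.ediv_eq_zero_of_lt h0 h1]
      omega
    rw [hkey]
    simp only [Int.toNat_one, List.range_one, List.map_cons, List.map_nil, Nat.cast_zero,
      mul_zero, add_zero, List.range_zero]

lemma pyRange_empty_pos {a b s : Int} (hs : 0 < s) (hab : b ≤ a) :
    PySem.List.pyRange a b s = [] := by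
  rw [PySem.List.pyRange_of_pos _ _ hs, if_neg (by omega)]
  simp

-- two multiples of s in a half-open window of width s coincide
lemma mult_window_eq {s j k : Int} (hs : 0 < s) (hj : s ∣ j) (hk : s ∣ k)
    (h1 : j ≤ k) (h2 : k < j + s) : k = j := by
  obtain ⟨c, hc⟩ := dvd_sub hk hj
  rcases lt_trichotomy c 0 with h | h | h
  · nlinarith [mul_le_mul_of_nonneg_left (show c ≤ -1 by omega) (le_of_lt hs)]
  · rw [h, mul_zero] at hc; omega
  · nlinarith [mul_le_mul_of_nonneg_left (show (1:Int) ≤ c by omega) (le_of_lt hs)]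

-- reading after writing, both indices in range
lemma pyGetD_pySetD (s : List Int) (j k v : Int) (hj0 : 0 ≤ j) (_hjl : j < (s.length : Int))
    (hk0 : 0 ≤ k) (hkl : k < (s.length : Int)) :
    PySem.List.pyGetD (PySem.List.pySetD s j v) k 0 = if k = j then v else PySem.List.pyGetD s k 0 := by
  rw [PySem.List.pySetD_of_nonneg _ _ hj0]
  have hkl' : k < (((s.set j.toNat v).length : Nat) : Int) := by simpa using hkl
  rw [PySem.List.pyGetD_eq_getElem _ _ hk0 hkl', PySem.List.pyGetD_eq_getElem _ _ hk0 hkl,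
    List.getElem_set]
  by_cases h : k = j
  · rw [if_pos (by omega), if_pos h]
  · rw [if_neg (by omega), if_neg h]

-- ===== A-side: the sieve builds minFac =====

lemma spfVal_window (i lo : Int) (hi : 0 < i) (hdlo : i ∣ lo) {k : Int} (hk2 : 2 ≤ k) (hk : k ≠ lo) :
    spfVal i (lo + i) k = spfVal i lo k := by
  unfold spfVal
  by_cases h1 : mfI k < i
  · rw [if_pos (Or.inl h1), if_pos (Or.inl h1)]
  · by_cases h2 : mfI k = i
    · by_cases h3 : k = i
      · rw [if_pos (Or.inr ⟨h2, Or.inl h3⟩), if_pos (Or.inr ⟨h2, Or.inl h3⟩)]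
      · by_cases h4 : k < lo
        · rw [if_pos (Or.inr ⟨h2, Or.inr (by omega)⟩), if_pos (Or.inr ⟨h2, Or.inr h4⟩)]
        · have hdk : i ∣ k := h2 ▸ mfI_dvd hk2
          have h5 : ¬ k < lo + i := fun hlt => hk (mult_window_eq hi hdlo hdk (by omega) (by omega))
          have hnc : ∀ f : Int, ¬ k < f → ¬ (mfI k < i ∨ (mfI k = i ∧ (k = i ∨ k < f))) := by
            rintro f hf (h | ⟨_, h | h⟩)
            · exact h1 h
            · exact h3 h
            · exact hf h
          rw [if_neg (hnc _ h5), if_neg (hnc _ h4)]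
    · have hnc : ∀ f : Int, ¬ (mfI k < i ∨ (mfI k = i ∧ (k = i ∨ k < f))) := by
        rintro f (h | ⟨h, _⟩)
        · exact h1 h
        · exact h2 h
      rw [if_neg (hnc _), if_neg (hnc _)]

lemma spfVal_top (i N k : Int) (hk : k ≤ N) : spfVal i (N+1) k = if mfI k ≤ i then mfI k else 0 := by
  unfold spfVal
  by_cases h2 : mfI k = i
  · rw [if_pos (Or.inr ⟨h2, Or.inr (by omega)⟩), if_pos (by omega)]
  · by_cases h1 : mfI k < i
    · rw [if_pos (Or.inl h1), if_pos (by omega)]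
    · rw [if_neg ?_, if_neg (by omega)]
      rintro (h | ⟨h, _⟩)
      · exact h1 h
      · exact h2 h

lemma spfVal_sq (a k : Int) (ha : 2 ≤ a) (hk2 : 2 ≤ k) (hk : k ≠ a) :
    spfVal a (a*a) k = if mfI k ≤ a - 1 then mfI k else 0 := by
  unfold spfVal
  by_cases h1 : mfI k < a
  · rw [if_pos (Or.inl h1), if_pos (by omega)]
  · by_cases h2 : mfI k = a
    · have hsq : a * a ≤ k := sq_le_of_mfI_eq ha hk2 hk h2
      rw [if_neg ?_, if_neg (by omega)]
      rintro (h | ⟨_, h | h⟩)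
      · exact h1 h
      · exact hk h
      · omega
    · rw [if_neg ?_, if_neg (by omega)]
      rintro (h | ⟨h, _⟩)
      · exact h1 h
      · exact h2 h

lemma sieve_inner (N i : Int) (hi2 : 2 ≤ i) :
    ∀ (fuel : Nat) (lo : Int) (s : List Int), (N + 1 - lo).toNat ≤ fuel →
    i * i ≤ lo → i ∣ (lo - i * i) →
    s.length = (N + 1).toNat →
    (∀ k, 2 ≤ k → k ≤ N → PySem.List.pyGetD s k 0 = spfVal i lo k) →
    ((PySem.List.pyRange lo (N+1) i).foldl (sieveStepInner i) s).length = (N + 1).toNat ∧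
    ∀ k, 2 ≤ k → k ≤ N →
      PySem.List.pyGetD ((PySem.List.pyRange lo (N+1) i).foldl (sieveStepInner i) s) k 0
        = spfVal i (N+1) k := by
  intro fuel
  induction fuel with
  | zero =>
      intro lo s hfuel hlo hdvd hlen hs
      rw [pyRange_empty_pos (by omega) (by omega)]
      simp only [List.foldl_nil]
      refine ⟨hlen, ?_⟩
      intro k hk2 hkN
      rw [hs k hk2 hkN]
      unfold spfVal
      exact if_congr (by omega) rfl rfl
  | succ f ihf =>
      intro lo s hfuel hlo hdvd hlen hs
      by_cases hlt : lo < N + 1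
      · have hii : i < i * i := by nlinarith
        have hdlo : i ∣ lo := by
          obtain ⟨c, hc⟩ := hdvd
          exact ⟨i + c, by rw [mul_add]; linarith⟩
        have hlo2 : 2 ≤ lo := by nlinarith
        have hslI : ((s.length : Nat) : Int) = N + 1 := by rw [hlen]; omega
        rw [pyRange_cons_pos (by omega) hlt, List.foldl_cons]
        have hstep_len : (sieveStepInner i s lo).length = (N+1).toNat := by
          unfold sieveStepInner
          split
          · rw [PySem.List.length_pySetD]; exact hlen
          · exact hlen
        have hvlo : PySem.List.pyGetD s lo 0 = if mfI lo < i then mfI lo else 0 := by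
          rw [hs lo hlo2 (by omega)]
          unfold spfVal
          by_cases h1 : mfI lo < i
          · rw [if_pos (Or.inl h1), if_pos h1]
          · rw [if_neg ?_, if_neg h1]
            rintro (h | ⟨h2, h | h⟩)
            · exact h1 h
            · omega
            · omega
        have hstep_inv : ∀ k, 2 ≤ k → k ≤ N →
            PySem.List.pyGetD (sieveStepInner i s lo) k 0 = spfVal i (lo + i) k := by
          intro k hk2 hkN
          unfold sieveStepInner
          by_cases hg : PySem.List.pyGetD s lo 0 = 0
          · rw [if_pos hg]
            have hmfeq : mfI lo = i := by
              have hle := mfI_le_of_dvd hi2 hlo2 hdlo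
              by_cases h1 : mfI lo < i
              · rw [hvlo, if_pos h1] at hg
                have := mfI_two_le hlo2
                omega
              · omega
            by_cases hk : k = lo
            · subst hk
              rw [pyGetD_pySetD s k k i (by omega) (by omega) (by omega) (by omega), if_pos rfl]
              unfold spfVal
              rw [if_pos (Or.inr ⟨hmfeq, Or.inr (by omega)⟩), hmfeq]
            · rw [pyGetD_pySetD s lo k i (by omega) (by omega) (by omega) (by omega), if_neg hk,
                hs k hk2 hkN]
              exact (spfVal_window i lo (by omega) hdlo hk2 hk).symm
          · rw [if_neg hg]
            rw [hs k hk2 hkN]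
            by_cases hk : k = lo
            · subst hk
              have h1 : mfI k < i := by
                by_contra hcon
                rw [hvlo, if_neg hcon] at hg
                exact hg rfl
              unfold spfVal
              rw [if_pos (Or.inl h1), if_pos (Or.inl h1)]
            · exact (spfVal_window i lo (by omega) hdlo hk2 hk).symm
        have hdvd' : i ∣ (lo + i - i * i) := by
          obtain ⟨c, hc⟩ := hdvd
          exact ⟨c + 1, by rw [mul_add, mul_one]; linarith⟩
        exact ihf (lo + i) (sieveStepInner i s lo) (by omega) (by omega) hdvd' hstep_len hstep_inv
      · rw [pyRange_empty_pos (by omega) (by omega)]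
        simp only [List.foldl_nil]
        refine ⟨hlen, ?_⟩
        intro k hk2 hkN
        rw [hs k hk2 hkN]
        unfold spfVal
        exact if_congr (by omega) rfl rfl

lemma sieve_outer (N : Int) :
    ∀ (fuel : Nat) (a : Int) (s : List Int), (N + 1 - a).toNat ≤ fuel → 2 ≤ a →
    s.length = (N + 1).toNat →
    (∀ k, 2 ≤ k → k ≤ N → PySem.List.pyGetD s k 0 = if mfI k ≤ a - 1 then mfI k else 0) →
    ∀ k, 2 ≤ k → k ≤ N →
      PySem.List.pyGetD ((PySem.List.pyRange a (N+1) 1).foldl (sieveStep N) s) k 0 = mfI k := by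
  intro fuel
  induction fuel with
  | zero =>
      intro a s hfuel ha2 hlen hs k hk2 hkN
      rw [PySem.List.pyRange_one_eq_nil (by omega), List.foldl_nil, hs k hk2 hkN,
        if_pos (by have := mfI_le hk2; omega)]
  | succ f ihf =>
      intro a s hfuel ha2 hlen hs k hk2 hkN
      by_cases hlt : a < N + 1
      · rw [PySem.List.pyRange_one_cons hlt, List.foldl_cons]
        have hguard := hs a ha2 (by omega)
        have hslI : ((s.length : Nat) : Int) = N + 1 := by rw [hlen]; omega
        by_cases hcase : mfI a ≤ a - 1
        · -- a is composite here: spf[a] ≠ 0, nothing happens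
          have hnotp : ¬ (a.toNat).Prime := by
            intro hp
            have h1 := hp.minFac_eq
            unfold mfI at hcase
            omega
          have hne0 : ¬ PySem.List.pyGetD s a 0 = 0 := by
            rw [hguard, if_pos hcase]
            have := mfI_two_le ha2
            omega
          have hss : sieveStep N s a = s := by
            unfold sieveStep
            rw [if_neg hne0]
          rw [hss]
          refine ihf (a+1) s (by omega) (by omega) hlen ?_ k hk2 hkN
          intro k' hk2' hkN'
          rw [hs k' hk2' hkN']
          have hne := mfI_ne_of_not_prime hk2' hnotp
          exact if_congr (by omega) rfl rfl
        · -- a is prime here: spf[a] = 0, mark a and its multiples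
          have hval0 : PySem.List.pyGetD s a 0 = 0 := by rw [hguard, if_neg hcase]
          have hmfa : mfI a = a := by have := mfI_le ha2; omega
          have hss : sieveStep N s a
              = (PySem.List.pyRange (a*a) (N+1) a).foldl (sieveStepInner a) (PySem.List.pySetD s a a) := by
            unfold sieveStep
            rw [if_pos hval0]
          rw [hss]
          have hinit : ∀ k', 2 ≤ k' → k' ≤ N →
              PySem.List.pyGetD (PySem.List.pySetD s a a) k' 0 = spfVal a (a*a) k' := by
            intro k' h2' hN'
            by_cases hk' : k' = a
            · rw [hk', pyGetD_pySetD s a a a (by omega) (by omega) (by omega) (by omega), if_pos rfl]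
              unfold spfVal
              rw [if_pos (Or.inr ⟨hmfa, Or.inl rfl⟩), hmfa]
            · rw [pyGetD_pySetD s a k' a (by omega) (by omega) (by omega) (by omega), if_neg hk',
                hs k' h2' hN']
              exact (spfVal_sq a k' ha2 h2' hk').symm
          have hinner := sieve_inner N a ha2 (N + 1 - a*a).toNat (a*a) (PySem.List.pySetD s a a)
            (le_refl _) (le_refl _) ⟨0, by ring⟩
            (by rw [PySem.List.length_pySetD]; exact hlen) hinit
          refine ihf (a+1) _ (by omega) (by omega) hinner.1 ?_ k hk2 hkN
          intro k' h2' hN'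
          rw [hinner.2 k' h2' hN', spfVal_top a N k' hN']
          exact if_congr (by omega) rfl rfl
      · rw [PySem.List.pyRange_one_eq_nil (by omega), List.foldl_nil, hs k hk2 hkN,
          if_pos (by have := mfI_le hk2; omega)]

lemma buildSpf_spec (N : Int) :
    ∀ k, 2 ≤ k → k ≤ N → PySem.List.pyGetD (buildSpf N) k 0 = mfI k := by
  intro k hk2 hkN
  unfold buildSpf
  refine sieve_outer N (N - 1).toNat 2 _ (by omega) (by norm_num) (by simp) ?_ k hk2 hkN
  intro k' h2' hN'
  have hlenr : (((List.replicate (N+1).toNat (0:Int)).length : Nat) : Int) = N + 1 := by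
    simp; omega
  rw [PySem.List.pyGetD_eq_getElem _ _ (by omega) (by omega), if_neg (by have := mfI_two_le h2'; omega)]
  simp

-- ===== A-side: the factor loops compute the divisor count =====

lemma solveInner_spec (q : Nat) (hq : q.Prime) :
    ∀ (n : Nat), 1 ≤ n → ∀ (fuel : Nat) (p : Int), n ≤ fuel →
    solveInner fuel (q : Int) (n : Int) p =
      (p + (n.factorization q : Int), ((n / q ^ n.factorization q : Nat) : Int)) := by
  intro n
  induction n using Nat.strong_induction_on with
  | _ n ih =>
    intro h1 fuel p hfuel
    obtain ⟨f, rfl⟩ : ∃ f, fuel = f + 1 := ⟨fuel - 1, by omega⟩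
    by_cases hdvd : q ∣ n
    · have hmod : PySem.Int.mod (n:Int) (q:Int) = 0 :=
        (PySem.Int.mod_eq_zero_iff_dvd _ _).mpr (Int.natCast_dvd_natCast.mpr hdvd)
      simp only [solveInner]
      rw [if_pos hmod, PySem.Int.floordiv_natCast]
      have hnq1 : 1 ≤ n / q := (Nat.one_le_div_iff hq.pos).mpr (Nat.le_of_dvd (by omega) hdvd)
      have hlt : n / q < n := Nat.div_lt_self (by omega) hq.one_lt
      rw [ih (n/q) hlt hnq1 f (p+1) (by omega)]
      have he : (n / q).factorization q = n.factorization q - 1 := by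
        rw [Nat.factorization_div hdvd]
        simp [hq.factorization_self]
      have hepos : 1 ≤ n.factorization q := hq.factorization_pos_of_dvd (by omega) hdvd
      have hfst : p + 1 + (((n / q).factorization q : Nat) : Int) = p + (n.factorization q : Int) := by
        rw [he]; omega
      have hsnd : n / q / q ^ ((n / q).factorization q) = n / q ^ n.factorization q := by
        rw [he, Nat.div_div_eq_div_mul]
        congr 1
        rw [← pow_succ']
        congr 1
        omega
      rw [hfst, hsnd]
    · have hmod : ¬ PySem.Int.mod (n:Int) (q:Int) = 0 := by
        rw [PySem.Int.mod_eq_zero_iff_dvd]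
        exact fun h => hdvd (Int.natCast_dvd_natCast.mp h)
      simp only [solveInner]
      rw [if_neg hmod, Nat.factorization_eq_zero_of_not_dvd hdvd]
      simp

lemma card_divisors_minFac_step {n : Nat} (h2 : 2 ≤ n) :
    (n.divisors.card : Int) =
      ((n.factorization n.minFac + 1 : Nat) : Int)
        * ((n / n.minFac ^ n.factorization n.minFac : Nat).divisors.card : Int) := by
  have hn0 : n ≠ 0 := by omega
  have hp : n.minFac.Prime := Nat.minFac_prime (by omega)
  have key : n.divisors.card
      = (n.factorization n.minFac + 1) * (n / n.minFac ^ n.factorization n.minFac).divisors.card := by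
    conv_lhs => rw [← Nat.ordProj_mul_ordCompl_eq_self n n.minFac]
    rw [Nat.Coprime.card_divisors_mul ((Nat.coprime_ordCompl hp hn0).pow_left _)]
    congr 1
    rw [Nat.divisors_prime_pow hp, Finset.card_map, Finset.card_range]
  exact_mod_cast key

lemma solveOuter_spec (N : Int) (spf : List Int)
    (hspf : ∀ k, 2 ≤ k → k ≤ N → PySem.List.pyGetD spf k 0 = mfI k) :
    ∀ (n : Nat), 1 ≤ n → (n : Int) ≤ N → ∀ (fuel : Nat) (count : Int), n ≤ fuel →
    solveOuter fuel spf (n : Int) count = count * (n.divisors.card : Int) := by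
  intro n
  induction n using Nat.strong_induction_on with
  | _ n ih =>
    intro h1 hN fuel count hfuel
    obtain ⟨f, rfl⟩ : ∃ f, fuel = f + 1 := ⟨fuel - 1, by omega⟩
    by_cases h2 : 2 ≤ n
    · have hg : (1:Int) < (n:Int) := by exact_mod_cast (by omega : 1 < n)
      simp only [solveOuter]
      rw [if_pos hg]
      have hsp : PySem.List.pyGetD spf (n:Int) 0 = ((n.minFac : Nat) : Int) := by
        rw [hspf (n:Int) (by exact_mod_cast h2) hN]
        unfold mfI
        rw [Int.toNat_natCast]
      have hqp : n.minFac.Prime := Nat.minFac_prime (by omega)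
      rw [hsp, Int.toNat_natCast, solveInner_spec n.minFac hqp n (by omega) n 1 (le_refl _)]
      dsimp only
      have hdq : n.minFac ∣ n := Nat.minFac_dvd n
      have hepos : 1 ≤ n.factorization n.minFac := hqp.factorization_pos_of_dvd (by omega) hdq
      have hq2e : 2 ≤ n.minFac ^ n.factorization n.minFac :=
        le_trans hqp.two_le (Nat.le_self_pow (by omega) _)
      have hmul : n.minFac ^ n.factorization n.minFac * (n / n.minFac ^ n.factorization n.minFac) = n :=
        Nat.ordProj_mul_ordCompl_eq_self n n.minFac
      have hn0' : n ≠ 0 := by omega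
      have hn'1 : 1 ≤ n / n.minFac ^ n.factorization n.minFac := Nat.ordCompl_pos n.minFac hn0'
      have hn'lt : n / n.minFac ^ n.factorization n.minFac < n := by nlinarith
      have hN' : ((n / n.minFac ^ n.factorization n.minFac : Nat) : Int) ≤ N := by
        have hle' : n / n.minFac ^ n.factorization n.minFac ≤ n := Nat.div_le_self _ _
        have hc : ((n / n.minFac ^ n.factorization n.minFac : Nat) : Int) ≤ (n : Int) := by
          exact_mod_cast hle'
        omega
      rw [ih _ hn'lt hn'1 hN' f _ (by omega)]
      rw [card_divisors_minFac_step (show 2 ≤ n from h2)]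
      push_cast
      ring
    · have hn1 : n = 1 := by omega
      subst hn1
      have hg : ¬ (1:Int) < ((1:Nat):Int) := by norm_num
      simp only [solveOuter]
      rw [if_neg hg]
      simp [Nat.divisors_one]

lemma solveOuter_le_one (spf : List Int) (fuel : Nat) (val count : Int) (h : ¬ 1 < val) :
    solveOuter fuel spf val count = count := by
  cases fuel with
  | zero => rfl
  | succ f => simp [solveOuter, h]

-- ===== B-side: the divisor-count sieve =====

lemma cnt_zero (m : Nat) : cnt 0 m = 0 := by
  simp [cnt]

lemma cnt_succ (d m : Nat) (hd : 1 ≤ d) :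
    cnt d m = cnt (d - 1) m + (if d ∣ m then 1 else 0) := by
  obtain ⟨d', rfl⟩ : ∃ d', d = d' + 1 := ⟨d - 1, by omega⟩
  unfold cnt
  have hins : Finset.Icc 1 (d' + 1) = insert (d' + 1) (Finset.Icc 1 d') := by
    ext x
    simp only [Finset.mem_Icc, Finset.mem_insert]
    omega
  rw [show d' + 1 - 1 = d' from rfl, hins, Finset.filter_insert]
  by_cases h : (d' + 1) ∣ m
  · rw [if_pos h, if_pos h, Finset.card_insert_of_notMem]
    simp only [Finset.mem_filter, Finset.mem_Icc]
    rintro ⟨⟨_, hle⟩, _⟩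
    omega
  · rw [if_neg h, if_neg h, add_zero]

lemma cnt_of_le {D m : Nat} (hm : 1 ≤ m) (hmD : m ≤ D) : cnt D m = m.divisors.card := by
  unfold cnt
  congr 1
  ext x
  simp only [Finset.mem_filter, Finset.mem_Icc, Nat.mem_divisors]
  constructor
  · rintro ⟨⟨_, _⟩, h3⟩
    exact ⟨h3, by omega⟩
  · rintro ⟨hh1, _⟩
    exact ⟨⟨Nat.pos_of_dvd_of_pos hh1 (by omega), le_trans (Nat.le_of_dvd (by omega) hh1) hmD⟩, hh1⟩

lemma dcVal_window (d lo m : Int) (hd : 0 < d) (hdlo : d ∣ lo) (hm : m ≠ lo) :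
    ((if d ∣ m ∧ m < lo + d then 1 else 0) : Int) = (if d ∣ m ∧ m < lo then 1 else 0) := by
  by_cases h1 : d ∣ m
  · by_cases hlt2 : m < lo
    · rw [if_pos ⟨h1, by omega⟩, if_pos ⟨h1, hlt2⟩]
    · by_cases h3 : m < lo + d
      · exact absurd (mult_window_eq hd hdlo h1 (by omega) h3) hm
      · rw [if_neg (fun hc => h3 hc.2), if_neg (fun hc => hlt2 hc.2)]
  · rw [if_neg (fun hc => h1 hc.1), if_neg (fun hc => h1 hc.1)]

lemma dc_inner (N d : Int) (hd : 1 ≤ d) :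
    ∀ (fuel : Nat) (lo : Int) (s : List Int), (N + 1 - lo).toNat ≤ fuel →
    d ≤ lo → d ∣ lo →
    s.length = (N + 1).toNat →
    (∀ m, 1 ≤ m → m ≤ N → PySem.List.pyGetD s m 0 =
      (cnt (d.toNat - 1) m.toNat : Int) + (if d ∣ m ∧ m < lo then 1 else 0)) →
    ((PySem.List.pyRange lo (N+1) d).foldl dcStepInner s).length = (N + 1).toNat ∧
    ∀ m, 1 ≤ m → m ≤ N →
      PySem.List.pyGetD ((PySem.List.pyRange lo (N+1) d).foldl dcStepInner s) m 0
        = (cnt d.toNat m.toNat : Int) := by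
  intro fuel
  induction fuel with
  | zero =>
      intro lo s hfuel hlo hdvd hlen hs
      rw [pyRange_empty_pos (by omega) (by omega)]
      simp only [List.foldl_nil]
      refine ⟨hlen, ?_⟩
      intro m h1 hN
      rw [hs m h1 hN, cnt_succ d.toNat m.toNat (by omega)]
      by_cases hdm : d ∣ m
      · have hdm' : d.toNat ∣ m.toNat := (dvd_iff_toNat_dvd (by omega) (by omega)).mp hdm
        rw [if_pos ⟨hdm, by omega⟩, if_pos hdm']
        push_cast
        ring
      · have hdm' : ¬ d.toNat ∣ m.toNat := fun h => hdm ((dvd_iff_toNat_dvd (by omega) (by omega)).mpr h)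
        rw [if_neg (fun hc => hdm hc.1), if_neg hdm']
        push_cast
        ring
  | succ f ihf =>
      intro lo s hfuel hlo hdvd hlen hs
      by_cases hlt : lo < N + 1
      · have hslI : ((s.length : Nat) : Int) = N + 1 := by rw [hlen]; omega
        rw [pyRange_cons_pos (by omega) hlt, List.foldl_cons]
        have hlen' : (dcStepInner s lo).length = (N+1).toNat := by
          unfold dcStepInner
          rw [PySem.List.length_pySetD]
          exact hlen
        have hinv' : ∀ m, 1 ≤ m → m ≤ N → PySem.List.pyGetD (dcStepInner s lo) m 0 =
            (cnt (d.toNat - 1) m.toNat : Int) + (if d ∣ m ∧ m < lo + d then 1 else 0) := by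
          intro m h1 hN
          unfold dcStepInner
          by_cases hm : m = lo
          · subst hm
            rw [pyGetD_pySetD s m m _ (by omega) (by omega) (by omega) (by omega), if_pos rfl,
              hs m h1 hN]
            have hno : ¬ (d ∣ m ∧ m < m) := fun hc => absurd hc.2 (lt_irrefl m)
            rw [if_neg hno, add_zero, if_pos ⟨hdvd, by omega⟩]
          · rw [pyGetD_pySetD s lo m _ (by omega) (by omega) (by omega) (by omega), if_neg hm,
              hs m h1 hN, dcVal_window d lo m (by omega) hdvd hm]
        exact ihf (lo + d) _ (by omega) (by omega) (dvd_add hdvd (dvd_refl d)) hlen' hinv'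
      · rw [pyRange_empty_pos (by omega) (by omega)]
        simp only [List.foldl_nil]
        refine ⟨hlen, ?_⟩
        intro m h1 hN
        rw [hs m h1 hN, cnt_succ d.toNat m.toNat (by omega)]
        by_cases hdm : d ∣ m
        · have hdm' : d.toNat ∣ m.toNat := (dvd_iff_toNat_dvd (by omega) (by omega)).mp hdm
          rw [if_pos ⟨hdm, by omega⟩, if_pos hdm']
          push_cast
          ring
        · have hdm' : ¬ d.toNat ∣ m.toNat := fun h => hdm ((dvd_iff_toNat_dvd (by omega) (by omega)).mpr h)
          rw [if_neg (fun hc => hdm hc.1), if_neg hdm']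
          push_cast
          ring

lemma dc_outer (N : Int) :
    ∀ (fuel : Nat) (a : Int) (s : List Int), (N + 1 - a).toNat ≤ fuel → 1 ≤ a →
    s.length = (N + 1).toNat →
    (∀ m, 1 ≤ m → m ≤ N → PySem.List.pyGetD s m 0 = (cnt (a.toNat - 1) m.toNat : Int)) →
    ∀ m, 1 ≤ m → m ≤ N →
      PySem.List.pyGetD ((PySem.List.pyRange a (N+1) 1).foldl (dcStep N) s) m 0
        = (m.toNat.divisors.card : Int) := by
  intro fuel
  induction fuel with
  | zero =>
      intro a s hfuel ha1 hlen hs m h1 hN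
      rw [PySem.List.pyRange_one_eq_nil (by omega), List.foldl_nil, hs m h1 hN,
        cnt_of_le (by omega) (by omega)]
  | succ f ihf =>
      intro a s hfuel ha1 hlen hs m h1 hN
      by_cases hlt : a < N + 1
      · rw [PySem.List.pyRange_one_cons hlt, List.foldl_cons]
        have hinv : ∀ m', 1 ≤ m' → m' ≤ N → PySem.List.pyGetD s m' 0 =
            (cnt (a.toNat - 1) m'.toNat : Int) + (if a ∣ m' ∧ m' < a then 1 else 0) := by
          intro m' h1' hN'
          rw [hs m' h1' hN']
          have hno : ¬ (a ∣ m' ∧ m' < a) := by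
            rintro ⟨hdvd', hlt'⟩
            have := Int.le_of_dvd (by omega) hdvd'
            omega
          rw [if_neg hno, add_zero]
        have hstep := dc_inner N a (by omega) (N + 1 - a).toNat a s (le_refl _) (le_refl _)
          (dvd_refl a) hlen hinv
        rw [show dcStep N s a = (PySem.List.pyRange a (N+1) a).foldl dcStepInner s from rfl]
        refine ihf (a+1) _ (by omega) (by omega) hstep.1 ?_ m h1 hN
        intro m' h1' hN'
        rw [hstep.2 m' h1' hN']
        have he : (a + 1).toNat - 1 = a.toNat := by omega
        rw [he]
      · rw [PySem.List.pyRange_one_eq_nil (by omega), List.foldl_nil, hs m h1 hN,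
          cnt_of_le (by omega) (by omega)]

lemma buildDc_spec (N : Int) :
    ∀ m, 1 ≤ m → m ≤ N → PySem.List.pyGetD (buildDc N) m 0 = (m.toNat.divisors.card : Int) := by
  intro m h1 hN
  unfold buildDc
  refine dc_outer N N.toNat 1 _ (by omega) (by norm_num) (by simp) ?_ m h1 hN
  intro m' h1' hN'
  have hlenr : (((List.replicate (N+1).toNat (0:Int)).length : Nat) : Int) = N + 1 := by
    simp; omega
  rw [PySem.List.pyGetD_eq_getElem _ _ (by omega) (by omega)]
  simp [cnt_zero]

-- ===== VERDICT (by name: the statement is the Claim_ definition above) =====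
theorem solve_spec : Claim_equal_solve := by
  unfold Claim_equal_solve
  intro A _hD _hP
  unfold Spec_solve solve solve_alt
  cases hmax : PySem.List.max? A (fun x => x) with
  | none => rfl
  | some N =>
      simp only [PySem.List.foldl_append_singleton_eq_map, List.nil_append]
      apply List.map_congr_left
      intro val hval
      have hle : val ≤ N := PySem.List.max?_isMax hmax val hval
      by_cases h2 : 1 < val
      · rw [if_pos h2]
        obtain ⟨n, rfl⟩ : ∃ n : Nat, val = (n : Int) := ⟨val.toNat, (Int.toNat_of_nonneg (by omega)).symm⟩
        have h2n : 1 < n := by exact_mod_cast h2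
        simp only [Int.toNat_natCast]
        rw [solveOuter_spec N (buildSpf N) (buildSpf_spec N) n (by omega) hle n 1 (le_refl _),
          one_mul, buildDc_spec N (n : Int) (by omega) hle]
        simp only [Int.toNat_natCast]
      · rw [if_neg h2, solveOuter_le_one _ _ _ _ h2]
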